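-- pv_equiv track=rewrite | github.com/Comsal99/SPOTIFY-SUBS | utils.py | calculate_bulk_payment_months
-- ===== SOURCE A (Python) =====
-- def calculate_bulk_payment_months(start_month: str, num_months: int) -> list[str]:
--     """Calculate which months to mark as paid for bulk payment."""
--     months = ["Jan", "Feb", "Mar", "Apr", "May", "Jun", "Jul", "Aug", "Sep", "Oct", "Nov", "Dec"]
--
--     try:
--         start_idx = months.index(start_month)
--     except ValueError:
--         start_idx = 0
--
--     selected_months = []
--     for i in range(num_months):
--         month_idx = (start_idx + i) % 12
--         selected_months.append(months[month_idx])
--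
--     return selected_months
-- ===== SOURCE B (Python) =====
-- def calculate_bulk_payment_months(start_month: str, num_months: int) -> list[str]:
--     """Calculate which months to mark as paid for bulk payment."""
--     months = ["Jan", "Feb", "Mar", "Apr", "May", "Jun", "Jul", "Aug", "Sep", "Oct", "Nov", "Dec"]
--
--     try:
--         start_idx = months.index(start_month)
--     except ValueError:
--         start_idx = 0
--
--     rotated = months[start_idx:] + months[:start_idx]
--     n = max(0, num_months)
--     return (rotated * (n // 12 + 1))[:n]
-- ===== Notes on version B (the rewrite author's own statement) =====
-- stated objective: simpler
-- what changed: Replaces the element-wise range loop with a %12 index computation per element by one rotation of the month list (two slices) repeated whole and cut to length with a single slice.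
import Mathlib
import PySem

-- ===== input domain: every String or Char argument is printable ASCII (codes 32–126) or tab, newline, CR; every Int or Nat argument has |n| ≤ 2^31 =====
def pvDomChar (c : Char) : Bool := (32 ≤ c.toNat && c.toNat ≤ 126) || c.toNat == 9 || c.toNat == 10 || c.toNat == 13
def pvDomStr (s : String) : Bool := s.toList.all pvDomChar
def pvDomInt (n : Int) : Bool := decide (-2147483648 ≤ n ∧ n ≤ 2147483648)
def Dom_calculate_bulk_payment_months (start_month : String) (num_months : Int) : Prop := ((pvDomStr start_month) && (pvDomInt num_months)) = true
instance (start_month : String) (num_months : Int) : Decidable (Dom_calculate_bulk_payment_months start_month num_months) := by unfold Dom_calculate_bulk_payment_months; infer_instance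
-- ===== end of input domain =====

-- B replaces A's element-wise %12 loop by one rotation of the month list (two slices) repeated and cut to length; objective: simpler.


-- ===== PORT A =====
def pvMonths : List String :=
  ["Jan", "Feb", "Mar", "Apr", "May", "Jun", "Jul", "Aug", "Sep", "Oct", "Nov", "Dec"]

-- try/except ValueError around months.index: index? = none is exactly the ValueError case
def pvStartIdx (start_month : String) : Int :=
  ((PySem.List.index? pvMonths start_month).map (fun n => (n : Int))).getD 0

def calculate_bulk_payment_months (start_month : String) (num_months : Int) : List String :=
  let months := pvMonths
  let start_idx := pvStartIdx start_month
  -- months[month_idx]: month_idx = (start_idx + i) % 12 is always in [0, 12), so indexing never raises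
  (PySem.List.pyRange 0 num_months 1).foldl
    (fun acc i => acc ++ [PySem.List.pyGetD months (PySem.Int.mod (start_idx + i) 12) ""]) []

-- ===== PORT B =====
def calculate_bulk_payment_months_alt (start_month : String) (num_months : Int) : List String :=
  let months := pvMonths
  let start_idx := pvStartIdx start_month
  let rotated := PySem.List.slice months (some start_idx) none ++ PySem.List.slice months none (some start_idx)
  let n := max 0 num_months
  ((List.replicate (PySem.Int.floordiv n 12 + 1).toNat rotated).flatten).take n.toNat

-- ===== PRECONDITION & SPEC =====
def Spec_calculate_bulk_payment_months (start_month : String) (num_months : Int) (out : List String) : Prop := out = calculate_bulk_payment_months_alt start_month num_months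
instance (start_month : String) (num_months : Int) (out : List String) : Decidable (Spec_calculate_bulk_payment_months start_month num_months out) := by unfold Spec_calculate_bulk_payment_months; infer_instance

-- ===== CLAIM (what is proved, stated in full; the proofs are below) =====
def Claim_equal_calculate_bulk_payment_months : Prop := ∀ (start_month : String) (num_months : Int), Dom_calculate_bulk_payment_months start_month num_months → Spec_calculate_bulk_payment_months start_month num_months (calculate_bulk_payment_months start_month num_months)

-- ===== LEMMAS AND PROOFS =====

-- the rotation index is a natural number below 12
lemma pvStartIdx_bounds (s : String) : 0 ≤ pvStartIdx s ∧ pvStartIdx s < 12 := by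
  unfold pvStartIdx
  rcases h : PySem.List.index? pvMonths s with _ | j
  · simp
  · rw [PySem.List.index?_eq_some_iff] at h
    obtain ⟨pre, suf, heq, hlen, -⟩ := h
    have hL : pvMonths.length = pre.length + (suf.length + 1) := by rw [heq]; simp
    simp [pvMonths] at hL
    show (0:Int) ≤ (j:Int) ∧ (j:Int) < 12
    omega

-- a prefix of a 12-element list, written as a map over range
lemma take_small (r : List String) (hr : r.length = 12) (n : Nat) (hn : n ≤ 12) :
    r.take n = (List.range n).map (fun k => r.getD (k % 12) "") := by
  apply List.ext_getElem
  · simp [hr]; omega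
  · intro i h1 h2
    simp only [List.getElem_take, List.getElem_map, List.getElem_range]
    have hi : i < n := by simpa using h2
    have : i % 12 = i := Nat.mod_eq_of_lt (by omega)
    rw [this, List.getD_eq_getElem r "" (by omega)]

-- prefix of a repeated 12-element block, as a map over range with index mod 12
lemma take_flatten_replicate (r : List String) (hr : r.length = 12) :
    ∀ (m n : Nat), n ≤ m * 12 →
      ((List.replicate m r).flatten).take n
        = (List.range n).map (fun k => r.getD (k % 12) "") := by
  intro m
  induction m with
  | zero => intro n hn; interval_cases n; simp
  | succ m ih =>
    intro n hn
    rw [List.replicate_succ, List.flatten_cons, List.take_append, hr]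
    by_cases h12 : n ≤ 12
    · have : n - 12 = 0 := by omega
      rw [this, List.take_zero, List.append_nil]
      exact take_small r hr n h12
    · have hrange : List.range n = List.range 12 ++ (List.range (n - 12)).map (12 + ·) := by
        rw [← List.range_add]; congr 1; omega
      rw [List.take_of_length_le (by omega), ih (n - 12) (by omega), hrange,
        List.map_append, List.map_map]
      congr 1
      · rw [← take_small r hr 12 (by omega), List.take_of_length_le (by omega)]
      · apply List.map_congr_left
        intro k _
        simp [Function.comp, Nat.add_mod_left]

-- the rotated list picks month (si + j) % 12
lemma rotated_getD (si j : Nat) (hsi : si < 12) (hj : j < 12) :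
    (pvMonths.drop si ++ pvMonths.take si).getD j ""
      = pvMonths.getD ((si + j) % 12) "" := by
  interval_cases si <;> interval_cases j <;> rfl

-- A's loop, as a map over range
lemma A_eq_map (s : String) (n : Int) :
    calculate_bulk_payment_months s n
      = (List.range n.toNat).map
          (fun k => pvMonths.getD (((pvStartIdx s).toNat + k) % 12) "") := by
  obtain ⟨h0, h12⟩ := pvStartIdx_bounds s
  unfold calculate_bulk_payment_months
  rw [PySem.List.foldl_append_singleton_eq_map, PySem.List.pyRange_one]
  rw [List.map_map]
  have hn : (n - 0).toNat = n.toNat := by omega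
  rw [hn]
  apply List.map_congr_left
  intro k _
  simp only [Function.comp]
  have hcast : pvStartIdx s + (0 + (k : Int)) = (((pvStartIdx s).toNat + k : Nat) : Int) := by
    push_cast; omega
  rw [hcast, PySem.Int.mod_eq_emod_of_pos (by norm_num)]
  have h2 : (((pvStartIdx s).toNat + k : Nat) : Int) % 12 = ((((pvStartIdx s).toNat + k) % 12 : Nat) : Int) := by
    push_cast; rfl
  rw [h2, PySem.List.pyGetD_natCast]

-- ===== VERDICT (by name: the statement is the Claim_ definition above) =====
theorem calculate_bulk_payment_months_spec : Claim_equal_calculate_bulk_payment_months := by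
  intro s n _
  unfold Spec_calculate_bulk_payment_months calculate_bulk_payment_months_alt
  obtain ⟨h0, h12⟩ := pvStartIdx_bounds s
  simp only
  rw [PySem.List.slice_from pvMonths h0, PySem.List.slice_to pvMonths h0]
  have hrlen : (pvMonths.drop (pvStartIdx s).toNat ++ pvMonths.take (pvStartIdx s).toNat).length = 12 := by
    simp [pvMonths]; omega
  have hfd : PySem.Int.floordiv (max 0 n) 12 = (max 0 n) / 12 :=
    PySem.Int.floordiv_eq_ediv_of_pos (by norm_num)
  have hle : (max 0 n).toNat ≤ ((max 0 n) / 12 + 1).toNat * 12 := by omega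
  rw [hfd, take_flatten_replicate _ hrlen _ _ hle, A_eq_map]
  have hnn : (max 0 n).toNat = n.toNat := by omega
  rw [hnn]
  apply List.map_congr_left
  intro k hk
  rw [rotated_getD _ _ (by omega) (Nat.mod_lt _ (by omega))]
  congr 1
  omega
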